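-- pv_equiv track=rewrite | github.com/williamw04/NichesNooksAndCrannies | src/approaches/web_scraper/scrapers/reddit.py | _is_generic
-- ===== SOURCE A (Python) =====
-- def _is_generic(name: str) -> bool:
--     generic_terms = {
--         "the best",
--         "a great",
--         "my favorite",
--         "this place",
--         "that place",
--         "the place",
--         "any good",
--         "some good",
--         "hidden gem",
--         "underrated",
--         "new york",
--         "nyc",
--     }
--     name_lower = name.lower()
--     return any(term in name_lower for term in generic_terms)
-- ===== SOURCE B (Python) =====
-- _GENERIC_TERMS = (
--     "the best", "a great", "my favorite", "this place", "that place",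
--     "the place", "any good", "some good", "hidden gem", "underrated",
--     "new york", "nyc",
-- )
--
-- def _is_generic(name: str) -> bool:
--     # single left-to-right scan: at each position try to match one of the phrases
--     s = name.lower()
--     return any(
--         s.startswith(t, i) for i in range(len(s) + 1) for t in _GENERIC_TERMS
--     )
-- ===== Notes on version B (the rewrite author's own statement) =====
-- stated objective: alternative
-- what changed: A asks, term by term, whether each phrase occurs anywhere in the lowercased name (12 independent substring scans); B makes one left-to-right scan over the positions of the lowercased name and at each position checks whether any phrase starts there.
import Mathlib
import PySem

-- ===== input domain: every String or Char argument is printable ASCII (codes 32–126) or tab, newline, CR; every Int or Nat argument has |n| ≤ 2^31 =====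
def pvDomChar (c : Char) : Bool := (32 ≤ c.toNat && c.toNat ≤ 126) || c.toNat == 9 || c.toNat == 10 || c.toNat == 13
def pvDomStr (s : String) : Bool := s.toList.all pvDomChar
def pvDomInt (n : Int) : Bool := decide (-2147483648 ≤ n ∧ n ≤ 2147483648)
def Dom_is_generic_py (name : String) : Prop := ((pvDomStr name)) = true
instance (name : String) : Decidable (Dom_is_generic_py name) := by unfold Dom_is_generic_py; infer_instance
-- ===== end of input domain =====

-- B replaces A's term-by-term containment tests with a single left-to-right scan of the
-- positions of the lowercased name, checking at each position whether any phrase starts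
-- there (objective: alternative, same cost).

-- ===== PORT A =====
def is_generic_py (name : String) : Bool :=
  let generic_terms : PySem.Set String := PySem.Set.ofList
    ["the best", "a great", "my favorite", "this place", "that place", "the place",
     "any good", "some good", "hidden gem", "underrated", "new york", "nyc"]
  let name_lower := PySem.Str.lower name
  generic_terms.any (fun term => PySem.Str.isIn term name_lower)

-- ===== PORT B =====
def pvTerms : List String :=
  ["the best", "a great", "my favorite", "this place", "that place", "the place",
   "any good", "some good", "hidden gem", "underrated", "new york", "nyc"]

-- does some phrase start at the head of s? (= s.startswith(t, i) for the suffix at i)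
def pvMatchAt (s : List Char) : Bool := pvTerms.any (fun t => t.toList.isPrefixOf s)

-- one pass over the positions of s (including the end position, as range(len(s)+1) does)
def pvScan : List Char → Bool
  | [] => pvMatchAt []
  | c :: rest => pvMatchAt (c :: rest) || pvScan rest

def is_generic_py_alt (name : String) : Bool :=
  pvScan (PySem.Chars.lower name.toList)

-- ===== PRECONDITION & SPEC =====
def Spec_is_generic_py (name : String) (out : Bool) : Prop := out = is_generic_py_alt name
instance (name : String) (out : Bool) : Decidable (Spec_is_generic_py name out) := by unfold Spec_is_generic_py; infer_instance

-- ===== CLAIM (what is proved, stated in full; the proofs are below) =====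
def Claim_equal_is_generic_py : Prop := ∀ (name : String), Dom_is_generic_py name → Spec_is_generic_py name (is_generic_py name)

-- ===== LEMMAS AND PROOFS =====

-- the position scan finds exactly the phrases occurring as infixes
theorem pvScan_iff (s : List Char) :
    pvScan s = true ↔ ∃ t ∈ pvTerms, t.toList <:+: s := by
  induction s with
  | nil =>
      simp [pvScan, pvMatchAt, List.any_eq_true, List.isPrefixOf_iff_prefix]
  | cons c r ih =>
      simp only [pvScan, Bool.or_eq_true, pvMatchAt, List.any_eq_true,
        List.isPrefixOf_iff_prefix, ih, List.infix_cons_iff]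
      constructor
      · rintro (⟨t, ht, h⟩ | ⟨t, ht, h⟩)
        · exact ⟨t, ht, Or.inl h⟩
        · exact ⟨t, ht, Or.inr h⟩
      · rintro ⟨t, ht, h | h⟩
        · exact Or.inl ⟨t, ht, h⟩
        · exact Or.inr ⟨t, ht, h⟩

-- the 12 phrase literals are distinct, so the Python set keeps them all in order
theorem pvSet_eq : (PySem.Set.ofList
    ["the best", "a great", "my favorite", "this place", "that place", "the place",
     "any good", "some good", "hidden gem", "underrated", "new york", "nyc"]
    : PySem.Set String) = pvTerms := by decide

-- ===== VERDICT (by name: the statement is the Claim_ definition above) =====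
theorem is_generic_py_spec : Claim_equal_is_generic_py := by
  intro name _
  unfold Spec_is_generic_py is_generic_py is_generic_py_alt
  rw [pvSet_eq]
  rw [Bool.eq_iff_iff, pvScan_iff, List.any_eq_true]
  constructor
  · rintro ⟨t, ht, h⟩
    refine ⟨t, ht, ?_⟩
    have := (PySem.Str.isIn_iff_infix (sub := t) (s := PySem.Str.lower name)).mp h
    simpa [PySem.Str.toList_lower] using this
  · rintro ⟨t, ht, h⟩
    refine ⟨t, ht, ?_⟩
    rw [PySem.Str.isIn_iff_infix]
    simpa [PySem.Str.toList_lower] using h
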